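-- pv_equiv track=rewrite | github.com/AminAvan/RL_in_EdgeSimPy | edge_sim_py/dataset_generator/create_dataset.py | is_central_node
-- ===== SOURCE A (Python) =====
-- def is_central_node(coord, all_coords, central_nodes):
--     # Define the six possible neighbor directions in a hexagonal grid
--     directions = [(2, 0), (-2, 0), (1, 1), (-1, 1), (1, -1), (-1, -1)]
--
--     for direction in directions:
--         neighbor = (coord[0] + direction[0], coord[1] + direction[1])
--
--         # Check if the neighbor exists in the grid
--         if neighbor not in all_coords:
--             return False
--
--         # Check if the neighbor is already a central node
--         if neighbor in central_nodes:
--             return False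
--
--     return True
-- ===== SOURCE B (Python) =====
-- def is_central_node(coord, all_coords, central_nodes):
--     # Scan the data lists instead of the six offsets: an arithmetic predicate
--     # recognises neighbor offsets, a set counts the distinct neighbors present.
--     def is_neighbor_offset(dx, dy):
--         return (abs(dy) == 1 and abs(dx) == 1) or (dy == 0 and abs(dx) == 2)
--
--     found = set()
--     for (x, y) in all_coords:
--         dx, dy = x - coord[0], y - coord[1]
--         if is_neighbor_offset(dx, dy):
--             found.add((dx, dy))
--     if len(found) != 6:
--         return False
--     for (x, y) in central_nodes:
--         if is_neighbor_offset(x - coord[0], y - coord[1]):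
--             return False
--     return True
-- ===== Notes on version B (the rewrite author's own statement) =====
-- stated objective: alternative
-- what changed: Instead of looping over the six fixed offsets and testing membership in the two lists, B scans the data lists once each: it recognises neighbor offsets with an arithmetic predicate, collects the distinct neighbor offsets found in all_coords into a set and requires exactly 6, then checks no central node has a neighbor offset.
import Mathlib
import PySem

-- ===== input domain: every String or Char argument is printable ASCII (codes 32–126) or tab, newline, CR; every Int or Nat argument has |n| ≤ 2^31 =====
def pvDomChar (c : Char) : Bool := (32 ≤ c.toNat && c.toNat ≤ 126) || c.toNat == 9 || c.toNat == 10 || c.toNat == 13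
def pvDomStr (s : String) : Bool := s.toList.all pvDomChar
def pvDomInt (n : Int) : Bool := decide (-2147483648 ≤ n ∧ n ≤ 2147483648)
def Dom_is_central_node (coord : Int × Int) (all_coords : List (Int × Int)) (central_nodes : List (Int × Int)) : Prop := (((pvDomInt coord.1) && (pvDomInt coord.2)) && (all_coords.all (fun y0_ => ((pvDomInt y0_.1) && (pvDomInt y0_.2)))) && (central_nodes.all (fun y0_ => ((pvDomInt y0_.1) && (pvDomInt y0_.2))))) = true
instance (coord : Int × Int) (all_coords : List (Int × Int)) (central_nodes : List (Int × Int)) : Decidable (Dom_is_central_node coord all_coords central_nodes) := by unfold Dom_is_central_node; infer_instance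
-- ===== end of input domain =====

-- B scans the data lists (all_coords, central_nodes) with an arithmetic neighbor-offset predicate and counts the distinct neighbor offsets found, instead of A's loop over the six fixed offsets with membership tests (alternative algorithm; same cost).


-- ===== PORT A =====
-- A-side helper: the for-loop over directions with its two early returns
def pvLoopA (coord : Int × Int) (all_coords : List (Int × Int)) (central_nodes : List (Int × Int)) : List (Int × Int) → Bool
  | [] => true
  | d :: ds =>
    let neighbor : Int × Int := (coord.1 + d.1, coord.2 + d.2)
    if ¬ (neighbor ∈ all_coords) then false
    else if neighbor ∈ central_nodes then false
    else pvLoopA coord all_coords central_nodes ds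

def is_central_node (coord : Int × Int) (all_coords : List (Int × Int)) (central_nodes : List (Int × Int)) : Bool :=
  pvLoopA coord all_coords central_nodes [(2, 0), (-2, 0), (1, 1), (-1, 1), (1, -1), (-1, -1)]

-- ===== PORT B =====
-- B-side helper: is_neighbor_offset(dx, dy)
def pvIsNbr (dx dy : Int) : Bool := (dy.natAbs == 1 && dx.natAbs == 1) || (dy == 0 && dx.natAbs == 2)

-- B-side helper: the first loop, collecting distinct neighbor offsets found in all_coords
def pvFound (coord : Int × Int) : List (Int × Int) → PySem.Set (Int × Int) → PySem.Set (Int × Int)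
  | [], found => found
  | (x, y) :: rest, found =>
    let dx := x - coord.1
    let dy := y - coord.2
    pvFound coord rest (if pvIsNbr dx dy then PySem.Set.add found (dx, dy) else found)

-- B-side helper: the second loop over central_nodes with its early return
def pvLoopC (coord : Int × Int) : List (Int × Int) → Bool
  | [] => true
  | (x, y) :: rest =>
    if pvIsNbr (x - coord.1) (y - coord.2) then false else pvLoopC coord rest

def is_central_node_alt (coord : Int × Int) (all_coords : List (Int × Int)) (central_nodes : List (Int × Int)) : Bool :=
  let found := pvFound coord all_coords PySem.Set.empty
  if PySem.Set.len found ≠ 6 then false else pvLoopC coord central_nodes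

-- ===== PRECONDITION & SPEC =====
def Spec_is_central_node (coord : Int × Int) (all_coords : List (Int × Int)) (central_nodes : List (Int × Int)) (out : Bool) : Prop := out = is_central_node_alt coord all_coords central_nodes
instance (coord : Int × Int) (all_coords : List (Int × Int)) (central_nodes : List (Int × Int)) (out : Bool) : Decidable (Spec_is_central_node coord all_coords central_nodes out) := by unfold Spec_is_central_node; infer_instance

-- ===== CLAIM =====
def Claim_equal_is_central_node : Prop := ∀ (coord : Int × Int) (all_coords : List (Int × Int)) (central_nodes : List (Int × Int)), Dom_is_central_node coord all_coords central_nodes → Spec_is_central_node coord all_coords central_nodes (is_central_node coord all_coords central_nodes)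

-- ===== LEMMAS AND PROOFS =====

def pvDirs : List (Int × Int) := [(2, 0), (-2, 0), (1, 1), (-1, 1), (1, -1), (-1, -1)]

theorem pvIsNbr_iff (dx dy : Int) : pvIsNbr dx dy = true ↔ (dx, dy) ∈ pvDirs := by
  simp [pvIsNbr, pvDirs, Prod.ext_iff]
  omega

theorem pvLoopA_eq (coord : Int × Int) (a c : List (Int × Int)) :
    ∀ ds, pvLoopA coord a c ds =
      ds.all (fun d => decide ((coord.1 + d.1, coord.2 + d.2) ∈ a ∧ (coord.1 + d.1, coord.2 + d.2) ∉ c)) := by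
  intro ds
  induction ds with
  | nil => rfl
  | cons d ds ih =>
    simp only [pvLoopA, List.all_cons, ih]
    split_ifs with h1 h2 <;> simp_all

theorem pvLoopC_eq (coord : Int × Int) :
    ∀ c : List (Int × Int), pvLoopC coord c =
      c.all (fun p => !pvIsNbr (p.1 - coord.1) (p.2 - coord.2)) := by
  intro c
  induction c with
  | nil => rfl
  | cons p rest ih =>
    obtain ⟨x, y⟩ := p
    simp only [pvLoopC, List.all_cons, ih]
    split_ifs with h <;> simp_all

theorem pvFound_mem (coord : Int × Int) :
    ∀ (l : List (Int × Int)) (s : PySem.Set (Int × Int)) (d : Int × Int),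
      d ∈ pvFound coord l s ↔ d ∈ s ∨ (pvIsNbr d.1 d.2 = true ∧ ∃ p ∈ l, (p.1 - coord.1, p.2 - coord.2) = d) := by
  intro l
  induction l with
  | nil => simp [pvFound]
  | cons p rest ih =>
    obtain ⟨x, y⟩ := p
    intro s d
    simp only [pvFound, ih, List.mem_cons]
    split_ifs with h
    · rw [PySem.Set.mem_add]
      constructor
      · rintro ((hd | hd2) | hs)
        · exact Or.inl hd
        · exact Or.inr ⟨by rw [hd2]; simpa using h, ⟨(x, y), Or.inl rfl, hd2.symm⟩⟩
        · exact Or.inr ⟨hs.1, hs.2.imp (fun q hq => ⟨Or.inr hq.1, hq.2⟩)⟩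
      · rintro (hd | ⟨hn, q, (rfl | hq), hqd⟩)
        · exact Or.inl (Or.inl hd)
        · exact Or.inl (Or.inr hqd.symm)
        · exact Or.inr ⟨hn, q, hq, hqd⟩
    · constructor
      · rintro (hd | ⟨hn, q, hq, hqd⟩)
        · exact Or.inl hd
        · exact Or.inr ⟨hn, q, Or.inr hq, hqd⟩
      · rintro (hd | ⟨hn, q, (rfl | hq), hqd⟩)
        · exact Or.inl hd
        · subst hqd; simp_all
        · exact Or.inr ⟨hn, q, hq, hqd⟩

theorem pvFound_nodup (coord : Int × Int) :
    ∀ (l : List (Int × Int)) (s : PySem.Set (Int × Int)), s.Nodup → (pvFound coord l s).Nodup := by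
  intro l
  induction l with
  | nil => intro s hs; exact hs
  | cons p rest ih =>
    obtain ⟨x, y⟩ := p
    intro s hs
    simp only [pvFound]
    split_ifs with h
    · exact ih _ (PySem.Set.nodup_add _ _ hs)
    · exact ih _ hs

-- found's length is 6 iff every direction offset is in found
theorem pvLen6_iff (found : List (Int × Int)) (hn : found.Nodup) (hsub : found ⊆ pvDirs) :
    found.length = 6 ↔ ∀ d ∈ pvDirs, d ∈ found := by
  have hdn : pvDirs.Nodup := by decide
  have hdl : pvDirs.length = 6 := by decide
  have h1 : List.Subperm found pvDirs := List.subperm_of_subset hn hsub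
  constructor
  · intro hlen d hd
    have hperm : found.Perm pvDirs := h1.perm_of_length_le (by omega)
    exact hperm.mem_iff.mpr hd
  · intro hall
    have h2 : List.Subperm pvDirs found := List.subperm_of_subset hdn (fun d hd => hall d hd)
    have ha := h1.length_le
    have hb := h2.length_le
    omega

-- ===== VERDICT =====
theorem is_central_node_spec : Claim_equal_is_central_node := by
  intro coord all_coords central_nodes _
  unfold Spec_is_central_node is_central_node is_central_node_alt
  rw [Bool.eq_iff_iff]
  set found := pvFound coord all_coords PySem.Set.empty with hfound
  have hmem : ∀ d : Int × Int, d ∈ found ↔ (d ∈ pvDirs ∧ (coord.1 + d.1, coord.2 + d.2) ∈ all_coords) := by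
    intro d
    rw [hfound, pvFound_mem]
    simp only [PySem.Set.empty, List.not_mem_nil, false_or, pvIsNbr_iff]
    constructor
    · rintro ⟨hd, p, hp, rfl⟩
      refine ⟨hd, ?_⟩
      have he : (coord.1 + (p.1 - coord.1), coord.2 + (p.2 - coord.2)) = p := by
        ext <;> simp
      rw [he]; exact hp
    · rintro ⟨hd, hp⟩
      exact ⟨hd, (coord.1 + d.1, coord.2 + d.2), hp, by ext <;> simp⟩
  have hnodup : found.Nodup := pvFound_nodup coord all_coords PySem.Set.empty (by simp [PySem.Set.empty])
  have hsub : found ⊆ pvDirs := fun d hd => ((hmem d).mp hd).1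
  have hcn : ∀ p : Int × Int, pvIsNbr (p.1 - coord.1) (p.2 - coord.2) = true ↔
      (∃ d ∈ pvDirs, (coord.1 + d.1, coord.2 + d.2) = p) := by
    intro p
    rw [pvIsNbr_iff]
    constructor
    · intro hd
      refine ⟨(p.1 - coord.1, p.2 - coord.2), hd, ?_⟩
      ext <;> simp
    · rintro ⟨d, hd, rfl⟩
      simpa using hd
  rw [pvLoopA_eq, pvLoopC_eq]
  simp only [PySem.Set.len, List.all_eq_true, decide_eq_true_eq]
  constructor
  · intro h
    have h6 : found.length = 6 := by
      rw [pvLen6_iff found hnodup hsub]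
      intro d hd
      exact (hmem d).mpr ⟨hd, (h d hd).1⟩
    rw [if_neg (by omega)]
    simp only [List.all_eq_true]
    intro p hp
    simp only [Bool.not_eq_true']
    by_contra hb
    simp only [Bool.not_eq_false, hcn] at hb
    obtain ⟨d, hd, hdp⟩ := hb
    exact (h d hd).2 (hdp ▸ hp)
  · intro h
    split_ifs at h with hl
    · rw [not_not] at hl
      have hall := (pvLen6_iff found hnodup hsub).mp (by omega : found.length = 6)
      simp only [List.all_eq_true] at h
      intro d hd
      refine ⟨((hmem d).mp (hall d hd)).2, ?_⟩
      intro hc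
      have hb := h _ hc
      rw [Bool.not_eq_true', ← Bool.not_eq_true, hcn] at hb
      exact hb ⟨d, hd, by ext <;> simp⟩
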